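-- pv_equiv track=rewrite | github.com/msrosenberg/ImpactFactor | Impact_Funcs.py | calculate_career_years_h_index_pub
-- ===== SOURCE A (Python) =====
-- def calculate_career_years_h_index_pub(pub_years: list) -> int:
--     miny = min(pub_years)
--     maxy = max(pub_years)
--     year_cnts = {y: pub_years.count(y) for y in range(miny, maxy+1)}
--     data = []
--     for y in year_cnts:
--         data.append([year_cnts[y], y])
--     data.sort(reverse=True)
--     h = 0
--     for i in range(len(data)):
--         cnt = data[i][0]
--         if cnt >= i + 1:
--             h += 1
--     return h
-- ===== SOURCE B (Python) =====
-- def calculate_career_years_h_index_pub(pub_years: list) -> int: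
--     # Frequency map of publications per career year (gap years with zero
--     # publications can never contribute to h, so they are not materialised).
--     counts = {}
--     for y in pub_years:
--         counts[y] = counts.get(y, 0) + 1
--     vals = list(counts.values())
--     # Grow h while h+1 is still feasible: more than h years have > h publications.
--     h = 0
--     while sum(1 for c in vals if c > h) > h:
--         h += 1
--     return h
-- ===== Notes on version B (the rewrite author's own statement) =====
-- stated objective: faster
-- what changed: Instead of materialising a count for every calendar year in range(min,max+1), building the full (count, year) list and sorting it descending before the indexed scan, B builds one frequency dict over the actual publication years only and grows h upward while more than h years have more than h publications, with no sort and no per-gap-year work.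
import Mathlib
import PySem

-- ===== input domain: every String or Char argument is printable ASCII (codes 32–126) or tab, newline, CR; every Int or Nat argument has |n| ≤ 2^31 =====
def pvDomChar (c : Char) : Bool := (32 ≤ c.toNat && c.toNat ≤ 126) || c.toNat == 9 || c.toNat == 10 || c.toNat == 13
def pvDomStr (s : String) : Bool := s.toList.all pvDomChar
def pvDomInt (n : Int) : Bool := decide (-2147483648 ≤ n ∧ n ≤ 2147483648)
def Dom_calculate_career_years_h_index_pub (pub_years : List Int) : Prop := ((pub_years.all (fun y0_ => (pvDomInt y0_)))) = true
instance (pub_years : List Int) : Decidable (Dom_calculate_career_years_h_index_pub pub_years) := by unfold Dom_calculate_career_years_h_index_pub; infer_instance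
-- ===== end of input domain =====

-- B replaces A's full-calendar-range counting + descending sort + indexed scan by a single
-- frequency dict over the actual years and an upward growth of h (no sort, no gap-year work): faster.


-- ===== PORT A =====
def calculate_career_years_h_index_pub (pub_years : List Int) : Int :=
  let miny := (PySem.List.min? pub_years (fun y => y)).getD 0
  let maxy := (PySem.List.max? pub_years (fun y => y)).getD 0
  let year_cnts : PySem.Dict Int Int :=
    (PySem.List.pyRange miny (maxy + 1) 1).foldl
      (fun d y => d.insert y ((PySem.List.count pub_years y : Int))) PySem.Dict.empty
  let data : List (Int × Int) :=
    year_cnts.keys.foldl (fun acc y => acc ++ [(year_cnts.getD y 0, y)]) []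
  let data2 := PySem.List.sorted2 data (fun p => p.1) (fun p => p.2) true
  (PySem.List.pyRange 0 (data2.length) 1).foldl
    (fun h i =>
      let cnt := (PySem.List.pyGetD data2 i (0, 0)).1
      if i + 1 ≤ cnt then h + 1 else h) 0

-- ===== PORT B =====
-- sum(1 for c in vals if c > h)
def pvCountGreater (vals : List Int) (h : Int) : Int := (vals.countP (fun c => decide (h < c)) : Int)

-- the while loop; fuel vals.length + 1 is enough because the guard forces h < len(vals)
def pvHLoop (vals : List Int) : Nat → Int → Int
  | 0, h => h
  | fuel + 1, h => if h < pvCountGreater vals h then pvHLoop vals fuel (h + 1) else h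

def calculate_career_years_h_index_pub_alt (pub_years : List Int) : Int :=
  let counts := pub_years.foldl (fun d y => d.insert y (d.getD y 0 + 1))
    (PySem.Dict.empty : PySem.Dict Int Int)
  let vals := counts.values
  pvHLoop vals (vals.length + 1) 0

-- ===== PRECONDITION & SPEC =====
-- Pre_ excludes only the empty list, on which Python A raises ValueError (min of empty sequence).
def Pre_calculate_career_years_h_index_pub (pub_years : List Int) : Prop := pub_years ≠ []
instance (pub_years : List Int) : Decidable (Pre_calculate_career_years_h_index_pub pub_years) := by unfold Pre_calculate_career_years_h_index_pub; infer_instance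
def pvWitness_calculate_career_years_h_index_pub : List Int := [2000, 2000, 2001]

def Spec_calculate_career_years_h_index_pub (pub_years : List Int) (out : Int) : Prop := out = calculate_career_years_h_index_pub_alt pub_years
instance (pub_years : List Int) (out : Int) : Decidable (Spec_calculate_career_years_h_index_pub pub_years out) := by unfold Spec_calculate_career_years_h_index_pub; infer_instance

-- ===== CLAIM (what is proved, stated in full; the proofs are below) =====
def Claim_equal_calculate_career_years_h_index_pub : Prop := ∀ (pub_years : List Int), Dom_calculate_career_years_h_index_pub pub_years → Pre_calculate_career_years_h_index_pub pub_years → Spec_calculate_career_years_h_index_pub pub_years (calculate_career_years_h_index_pub pub_years)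

-- ===== LEMMAS AND PROOFS =====

-- number of entries of cs whose first component is ≥ h
def pvQ (cs : List (Int × Int)) (h : Int) : Nat := cs.countP (fun c => decide (h ≤ c.1))
-- number of entries of vals that are ≥ h
def pvQV (vals : List Int) (h : Int) : Nat := vals.countP (fun c => decide (h ≤ c))
-- A's scan count, with a running start index
def pvK (xs : List (Int × Int)) (s : Int) : Nat :=
  (PySem.List.enumerate xs s).countP (fun ic => decide (ic.1 + 1 ≤ ic.2.1))
-- the lexicographic descending "before" test sorted2 … true uses
def pvBefore (a b : Int × Int) : Bool :=
  decide (b.1 < a.1) || (!decide (a.1 < b.1) && decide (b.2 < a.2))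

theorem pvQ_antitone (cs : List (Int × Int)) {h h' : Int} (hle : h ≤ h') : pvQ cs h' ≤ pvQ cs h := by
  unfold pvQ
  exact List.countP_mono_left (fun c _ hc => by simp only [decide_eq_true_eq] at *; omega)

theorem pvQV_antitone (vals : List Int) {h h' : Int} (hle : h ≤ h') : pvQV vals h' ≤ pvQV vals h := by
  unfold pvQV
  exact List.countP_mono_left (fun c _ hc => by simp only [decide_eq_true_eq] at *; omega)

-- B's loop result r satisfies: the guard fails at r, and (unless it never ran) pvQV r ≥ r
theorem pvHLoop_spec (vals : List Int) (fuel : Nat) (h : Int) (h0 : 0 ≤ h)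
    (hfuel : (vals.length : Int) < h + fuel) :
    0 ≤ pvHLoop vals fuel h ∧
      pvCountGreater vals (pvHLoop vals fuel h) ≤ pvHLoop vals fuel h ∧
      (pvHLoop vals fuel h = h ∨ (pvHLoop vals fuel h : Int) ≤ (pvQV vals (pvHLoop vals fuel h) : Int)) := by
  induction fuel generalizing h with
  | zero =>
    simp only [pvHLoop]
    have hlen := List.countP_le_length (p := fun c => decide (h < c)) (l := vals)
    refine ⟨h0, ?_, by simp⟩
    unfold pvCountGreater
    push_cast at hfuel ⊢
    omega
  | succ fuel ih =>
    simp only [pvHLoop]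
    split
    · rename_i hcond
      have ih' := ih (h + 1) (by omega) (by push_cast at hfuel ⊢; omega)
      refine ⟨ih'.1, ih'.2.1, ?_⟩
      rcases ih'.2.2 with heq | hle
      · right
        rw [heq]
        have hcg : vals.countP (fun c => decide (h < c)) = vals.countP (fun c => decide (h + 1 ≤ c)) := by
          exact List.countP_congr (fun c _ => by simp only [decide_eq_true_eq]; omega)
        unfold pvCountGreater at hcond
        unfold pvQV
        rw [hcg] at hcond
        omega
      · exact Or.inr hle
    · rename_i hcond
      exact ⟨h0, by omega, Or.inl rfl⟩

-- connecting the guard's strict count with pvQV at the next threshold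
theorem pvCountGreater_eq (vals : List Int) (h : Int) :
    pvCountGreater vals h = (pvQV vals (h + 1) : Int) := by
  unfold pvCountGreater pvQV
  exact congrArg _ (List.countP_congr (fun c _ => by simp only [decide_eq_true_eq]; omega))

-- A's indexed scan over a list with nonincreasing first components brackets its own count
theorem pvK_brackets (xs : List (Int × Int)) : ∀ (s : Int), 0 ≤ s →
    xs.Pairwise (fun a b => b.1 ≤ a.1) →
    pvK xs s ≤ pvQ xs (s + pvK xs s) ∧ pvQ xs (s + pvK xs s + 1) ≤ pvK xs s := by
  induction xs with
  | nil =>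
    intro s _ _
    simp [pvK, pvQ, PySem.List.enumerate_nil]
  | cons c t ih =>
    intro s hs hsor
    rw [List.pairwise_cons] at hsor
    obtain ⟨hy, ht⟩ := hsor
    have hk : pvK (c :: t) s =
        pvK t (s + 1) + (if s + 1 ≤ c.1 then 1 else 0) := by
      simp [pvK, PySem.List.enumerate_cons, List.countP_cons]
    by_cases hc : s + 1 ≤ c.1
    · -- head indicator true
      rw [if_pos hc] at hk
      have IH := ih (s + 1) (by omega) ht
      set kt := pvK t (s + 1) with hkt
      have hhead : s + 1 + (kt : Int) ≤ c.1 := by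
        rcases Nat.eq_zero_or_pos kt with h0 | hpos
        · rw [h0]; push_cast; omega
        · have hq : 0 < pvQ t (s + 1 + kt) := lt_of_lt_of_le hpos IH.1
          rw [pvQ, List.countP_pos_iff] at hq
          obtain ⟨e, he, hpe⟩ := hq
          simp only [decide_eq_true_eq] at hpe
          have := hy e he
          omega
      have hq1 : pvQ (c :: t) (s + (kt + 1 : Nat)) =
          pvQ t (s + 1 + kt) + 1 := by
        rw [pvQ, List.countP_cons, if_pos]
        · rw [pvQ]; congr 2
          push_cast; ring_nf
        · simp only [decide_eq_true_eq]; push_cast; omega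
      have hq2 : pvQ (c :: t) (s + (kt + 1 : Nat) + 1) ≤
          pvQ t (s + 1 + kt + 1) + 1 := by
        rw [pvQ, List.countP_cons]
        have : pvQ t (s + (kt + 1 : Nat) + 1) = pvQ t (s + 1 + kt + 1) := by
          rw [pvQ]; congr 2; push_cast; ring_nf
        rw [← this, pvQ]
        split <;> omega
      rw [hk]
      constructor
      · rw [hq1]; omega
      · calc pvQ (c :: t) (s + (kt + 1 : Nat) + 1) ≤ pvQ t (s + 1 + kt + 1) + 1 := hq2
          _ ≤ kt + 1 := by have := IH.2; omega
    · -- head indicator false: every later indicator fails too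
      rw [if_neg hc] at hk
      have hc' : c.1 ≤ s := by omega
      have htz : pvK t (s + 1) = 0 := by
        rw [pvK, List.countP_eq_zero]
        intro ic hic
        rw [PySem.List.mem_enumerate_iff] at hic
        obtain ⟨kk, hkk, rfl⟩ := hic
        simp only [decide_eq_true_eq]
        have hmem : t[kk] ∈ t := List.getElem_mem hkk
        have := hy _ hmem
        omega
      rw [htz] at hk
      refine ⟨by rw [hk]; exact Nat.zero_le _, ?_⟩
      rw [hk]
      have hz : pvQ (c :: t) (s + ((0 + 0 : Nat) : Int) + 1) = 0 := by
        rw [pvQ, List.countP_eq_zero]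
        intro e he
        simp only [decide_eq_true_eq]
        rcases List.mem_cons.mp he with rfl | hmem
        · push_cast; omega
        · have := hy e hmem; push_cast; omega
      omega

theorem pvSorted2_eq_foldl (xs : List (Int × Int)) :
    PySem.List.sorted2 xs (fun p => p.1) (fun p => p.2) true =
      xs.foldl (fun acc x => PySem.List.insertBy pvBefore x acc) [] := rfl

theorem pvInsertBy_pairwise (x : Int × Int) (ys : List (Int × Int))
    (h : ys.Pairwise (fun a b => b.1 ≤ a.1)) :
    (PySem.List.insertBy pvBefore x ys).Pairwise (fun a b => b.1 ≤ a.1) := by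
  induction ys with
  | nil => simp [PySem.List.insertBy]
  | cons y ys ih =>
    rw [List.pairwise_cons] at h
    obtain ⟨hy, hys⟩ := h
    simp only [PySem.List.insertBy]
    split
    · rename_i hb
      simp only [pvBefore, Bool.or_eq_true, Bool.and_eq_true, Bool.not_eq_true',
        decide_eq_true_eq, decide_eq_false_iff_not] at hb
      have hxy : y.1 ≤ x.1 := by rcases hb with h1 | ⟨h1, _⟩ <;> omega
      refine List.Pairwise.cons ?_ (List.Pairwise.cons hy hys)
      intro z hz
      rcases List.mem_cons.mp hz with rfl | hmem
      · exact hxy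
      · exact le_trans (hy z hmem) hxy
    · rename_i hb
      simp only [pvBefore, Bool.or_eq_true, Bool.and_eq_true, Bool.not_eq_true',
        decide_eq_true_eq, decide_eq_false_iff_not] at hb
      have hyx : x.1 ≤ y.1 := by omega
      refine List.Pairwise.cons ?_ (ih hys)
      intro z hz
      rcases (PySem.List.mem_insertBy pvBefore x z ys).mp hz with rfl | hmem
      · exact hyx
      · exact hy z hmem

theorem pvFoldl_insertBy_pairwise (xs : List (Int × Int)) :
    ∀ acc : List (Int × Int), acc.Pairwise (fun a b => b.1 ≤ a.1) →
      (xs.foldl (fun acc x => PySem.List.insertBy pvBefore x acc) acc).Pairwise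
        (fun a b => b.1 ≤ a.1) := by
  induction xs with
  | nil => intro acc hacc; simpa using hacc
  | cons x xs ih =>
    intro acc hacc
    simp only [List.foldl_cons]
    exact ih _ (pvInsertBy_pairwise x acc hacc)

-- the sorted2-descending result is pairwise nonincreasing in the first component
theorem pvSorted2_pairwise (xs : List (Int × Int)) :
    (PySem.List.sorted2 xs (fun p => p.1) (fun p => p.2) true).Pairwise (fun a b => b.1 ≤ a.1) := by
  rw [pvSorted2_eq_foldl]
  exact pvFoldl_insertBy_pairwise xs [] (by simp)

-- evaluating port A down to pvK of the sorted per-year count list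
theorem pvA_eval (pub_years : List Int) (m M : Int)
    (hmin : PySem.List.min? pub_years (fun y => y) = some m)
    (hmax : PySem.List.max? pub_years (fun y => y) = some M) :
    calculate_career_years_h_index_pub pub_years =
      ((pvK (PySem.List.sorted2
          ((PySem.List.pyRange m (M + 1) 1).map
            (fun y => ((PySem.List.count pub_years y : Int), y)))
          (fun p => p.1) (fun p => p.2) true) 0 : Nat) : Int) := by
  have hRnodup : (PySem.List.pyRange m (M + 1) 1).Nodup :=
    (PySem.List.pairwise_lt_pyRange_one m (M + 1)).imp (fun h => ne_of_lt h)
  have hd_items : ((PySem.List.pyRange m (M + 1) 1).foldl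
      (fun d y => d.insert y ((PySem.List.count pub_years y : Int)))
      (PySem.Dict.empty : PySem.Dict Int Int)).items =
      (PySem.List.pyRange m (M + 1) 1).map (fun y => (y, ((PySem.List.count pub_years y : Int)))) := by
    simpa using PySem.Dict.items_foldl_insert_fresh (PySem.List.pyRange m (M + 1) 1)
      (fun y => y) (fun y => ((PySem.List.count pub_years y : Int)))
      PySem.Dict.empty (fun a _ => PySem.Dict.contains_empty a) (by simpa using hRnodup)
  have hd_keys : ((PySem.List.pyRange m (M + 1) 1).foldl
      (fun d y => d.insert y ((PySem.List.count pub_years y : Int)))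
      (PySem.Dict.empty : PySem.Dict Int Int)).keys = PySem.List.pyRange m (M + 1) 1 := by
    simp only [PySem.Dict.keys, hd_items, List.map_map]
    simp [Function.comp_def]
  have hd_knodup : ((PySem.List.pyRange m (M + 1) 1).foldl
      (fun d y => d.insert y ((PySem.List.count pub_years y : Int)))
      (PySem.Dict.empty : PySem.Dict Int Int)).keys.Nodup := by
    rw [hd_keys]; exact hRnodup
  have hgetD : ∀ y ∈ PySem.List.pyRange m (M + 1) 1,
      ((PySem.List.pyRange m (M + 1) 1).foldl
        (fun d y => d.insert y ((PySem.List.count pub_years y : Int)))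
        (PySem.Dict.empty : PySem.Dict Int Int)).getD y 0 = (PySem.List.count pub_years y : Int) := by
    intro y hy
    exact PySem.Dict.getD_of_mem_items _ (by rw [hd_items]; exact List.mem_map_of_mem hy) hd_knodup 0
  have hdata : List.foldl (fun acc y => acc ++
        [(((PySem.List.pyRange m (M + 1) 1).foldl
            (fun d y => d.insert y ((PySem.List.count pub_years y : Int)))
            (PySem.Dict.empty : PySem.Dict Int Int)).getD y 0, y)]) []
        ((PySem.List.pyRange m (M + 1) 1).foldl
            (fun d y => d.insert y ((PySem.List.count pub_years y : Int)))
            (PySem.Dict.empty : PySem.Dict Int Int)).keys =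
      (PySem.List.pyRange m (M + 1) 1).map (fun y => ((PySem.List.count pub_years y : Int), y)) := by
    rw [hd_keys, PySem.List.foldl_append_singleton_eq_map, List.nil_append]
    exact List.map_congr_left (fun y hy => by rw [hgetD y hy])
  unfold calculate_career_years_h_index_pub
  rw [hmin, hmax]
  simp only [Option.getD_some]
  simp only [hdata]
  rw [PySem.List.foldl_ite_add_one]
  rw [zero_add]
  congr 1
  unfold pvK
  rw [PySem.List.enumerate_eq_map_pyRange _ ((0 : Int), (0 : Int)), List.countP_map]
  rfl

-- evaluating port B down to pvHLoop over the counter's values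
theorem pvB_eval (pub_years : List Int) :
    calculate_career_years_h_index_pub_alt pub_years =
      pvHLoop (PySem.Dict.counter pub_years).values
        ((PySem.Dict.counter pub_years).values.length + 1) 0 := by
  simp only [calculate_career_years_h_index_pub_alt,
    PySem.Dict.foldl_insert_getD_add_one_eq_counter]

-- the counter's values are the per-distinct-year counts
theorem pvVals_eq (pub_years : List Int) :
    (PySem.Dict.counter pub_years).values =
      (PySem.Set.ofList pub_years).map (fun y => ((PySem.List.count pub_years y : Nat) : Int)) := by
  simp only [PySem.Dict.values, PySem.Dict.items_counter, List.map_map]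
  rfl

-- for thresholds ≥ 1, counting qualifying calendar years equals counting qualifying distinct years
theorem pvCross (pub_years : List Int) (m M : Int)
    (hmin : PySem.List.min? pub_years (fun y => y) = some m)
    (hmax : PySem.List.max? pub_years (fun y => y) = some M)
    (h : Int) (hh : 1 ≤ h) :
    pvQ (PySem.List.sorted2
        ((PySem.List.pyRange m (M + 1) 1).map (fun y => ((PySem.List.count pub_years y : Int), y)))
        (fun p => p.1) (fun p => p.2) true) h =
      pvQV (PySem.Dict.counter pub_years).values h := by
  unfold pvQ pvQV
  rw [(PySem.List.sorted2_perm _ _ _ _).countP_eq, List.countP_map, pvVals_eq, List.countP_map]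
  rw [List.countP_eq_length_filter, List.countP_eq_length_filter]
  apply List.Perm.length_eq
  rw [List.perm_ext_iff_of_nodup
    (((PySem.List.pairwise_lt_pyRange_one m (M + 1)).imp (fun h => ne_of_lt h)).filter _)
    ((PySem.Set.nodup_ofList pub_years).filter _)]
  intro y
  simp only [List.mem_filter, Function.comp, decide_eq_true_eq]
  constructor
  · rintro ⟨_, hcy⟩
    have hmemp : y ∈ pub_years := by
      rw [← List.count_pos_iff (a := y) (l := pub_years)]
      have : (1 : Int) ≤ (PySem.List.count pub_years y : Int) := le_trans hh hcy
      unfold PySem.List.count at this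
      omega
    exact ⟨(PySem.Set.mem_ofList pub_years y).mpr hmemp, hcy⟩
  · rintro ⟨hmem, hcy⟩
    have hmemp : y ∈ pub_years := (PySem.Set.mem_ofList pub_years y).mp hmem
    refine ⟨PySem.List.mem_pyRange_one.mpr ⟨PySem.List.min?_isMin hmin y hmemp, ?_⟩, hcy⟩
    have := PySem.List.max?_isMax hmax y hmemp
    omega

-- ===== VERDICT (by name: the statement is the Claim_ definition above) =====
theorem calculate_career_years_h_index_pub_spec : Claim_equal_calculate_career_years_h_index_pub := by
  intro pub_years _ hne
  unfold Pre_calculate_career_years_h_index_pub at hne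
  unfold Spec_calculate_career_years_h_index_pub
  cases hmin : PySem.List.min? pub_years (fun y => y) with
  | none => exact absurd ((PySem.List.min?_eq_none_iff _ _).mp hmin) hne
  | some m =>
  cases hmax : PySem.List.max? pub_years (fun y => y) with
  | none => exact absurd ((PySem.List.max?_eq_none_iff _ _).mp hmax) hne
  | some M =>
  rw [pvA_eval pub_years m M hmin hmax, pvB_eval pub_years]
  set data2 := PySem.List.sorted2
      ((PySem.List.pyRange m (M + 1) 1).map (fun y => ((PySem.List.count pub_years y : Int), y)))
      (fun p => p.1) (fun p => p.2) true with hdata2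
  set vals := (PySem.Dict.counter pub_years).values with hvals
  -- A-side bracketing
  have hKA := pvK_brackets data2 0 le_rfl (pvSorted2_pairwise _)
  rw [zero_add] at hKA
  set k := pvK data2 0 with hk
  -- B-side bracketing
  have hB := pvHLoop_spec vals (vals.length + 1) 0 le_rfl (by push_cast; omega)
  set r := pvHLoop vals (vals.length + 1) 0 with hr
  obtain ⟨hr0, hstop, hdisj⟩ := hB
  have hrlow : (r : Int) ≤ (pvQV vals r : Int) := by
    rcases hdisj with hcase | hle
    · rw [hcase]; exact Int.natCast_nonneg _
    · exact hle
  have hrhigh : (pvQV vals (r + 1) : Int) ≤ r := by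
    rw [pvCountGreater_eq] at hstop
    omega
  -- cross equality for thresholds ≥ 1
  have hcross : ∀ h : Int, 1 ≤ h → pvQ data2 h = pvQV vals h := by
    intro h hh
    exact pvCross pub_years m M hmin hmax h hh
  -- A = B by antisymmetry through the bracketing facts
  have hkr : (k : Int) = r := by
    by_contra hneq
    rcases lt_or_gt_of_ne hneq with hlt | hgt
    · -- k < r : contradiction with pvQV r ≥ r
      have h1 : (1 : Int) ≤ r := by omega
      have e1 : pvQ data2 r = pvQV vals r := hcross r h1
      have e2 : pvQ data2 r ≤ pvQ data2 ((k : Int) + 1) := pvQ_antitone data2 (by omega)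
      have := hKA.2
      omega
    · -- r < k : contradiction with pvQ k ≥ k
      have h1 : (1 : Int) ≤ (k : Int) := by omega
      have e1 : pvQ data2 (k : Int) = pvQV vals (k : Int) := hcross _ h1
      have e2 : pvQV vals (k : Int) ≤ pvQV vals (r + 1) := pvQV_antitone vals (by omega)
      have := hKA.1
      omega
  exact hkr
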